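-- pv_equiv track=rewrite | github.com/abdelazizmohamed/AI-Powered-Telegram-Search-Q-A-Bot-RAG-System- | openai_answerer.py | _dedupe_consecutive_lines
-- ===== SOURCE A (Python) =====
-- from typing import List, Dict, Any, Optional, Tuple
--
-- def _dedupe_consecutive_lines(s: str) -> str:
--     """Remove consecutive duplicate lines and extra blank lines."""
--     lines = (s or "").splitlines()
--     out: List[str] = []
--     for ln in lines:
--         raw = ln.rstrip()
--         stripped = raw.strip()
--
--         # collapse multiple blank lines
--         if not stripped:
--             if out and out[-1] == "":
--                 continue
--             out.append("")
--             continue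
--
--         # drop consecutive duplicates (ignoring surrounding spaces)
--         if out and out[-1].strip() == stripped:
--             continue
--         out.append(raw)
--
--     return "\n".join(out).strip()
-- ===== SOURCE B (Python) =====
-- def _dedupe_consecutive_lines(s: str) -> str:
--     """Remove consecutive duplicate lines and extra blank lines."""
--     lines = (s or "").splitlines()
--     out = []
--     i, n = 0, len(lines)
--     while i < n:
--         key = lines[i].strip()
--         out.append("" if key == "" else lines[i].rstrip())
--         i += 1
--         while i < n and lines[i].strip() == key:
--             i += 1
--     return "\n".join(out).strip()
-- ===== Notes on version B (the rewrite author's own statement) =====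
-- stated objective: alternative
-- what changed: B partitions the line list into maximal runs of equal stripped content with a two-pointer scan and emits one output line per run, instead of A's single pass that compares each line to the last element already emitted.
import Mathlib
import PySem

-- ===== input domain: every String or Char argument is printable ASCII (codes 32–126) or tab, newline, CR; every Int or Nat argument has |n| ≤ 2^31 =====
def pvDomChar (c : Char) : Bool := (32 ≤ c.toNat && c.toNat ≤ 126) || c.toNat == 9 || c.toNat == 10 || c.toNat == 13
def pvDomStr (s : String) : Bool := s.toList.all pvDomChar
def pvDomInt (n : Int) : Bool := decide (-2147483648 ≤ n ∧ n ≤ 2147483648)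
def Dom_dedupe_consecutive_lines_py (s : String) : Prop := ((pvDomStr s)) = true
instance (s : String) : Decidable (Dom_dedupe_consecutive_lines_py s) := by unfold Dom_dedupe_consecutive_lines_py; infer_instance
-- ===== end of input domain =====

-- B replaces A's compare-to-last-emitted pass by a two-pointer scan over maximal runs of
-- lines with equal stripped content (objective: alternative decomposition, same cost).

-- ===== PORT A =====
-- loop body of A's for-loop, verbatim
def dedupeStepA (out : List String) (ln : String) : List String :=
  let raw := PySem.Str.rstrip ln
  let stripped := PySem.Str.strip raw
  if stripped = "" then
    if out.getLast? = some "" then out else out ++ [""]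
  else if out.getLast?.map PySem.Str.strip = some stripped then out
  else out ++ [raw]

def dedupe_consecutive_lines_py (s : String) : String :=
  let lines := PySem.Str.splitlines (if s = "" then "" else s)
  let out := lines.foldl dedupeStepA []
  PySem.Str.strip (PySem.Str.join "\n" out)

-- ===== PORT B =====
-- B's outer while-loop: emit one line per maximal run; the inner while (advancing i past the run)
-- is the dropWhile on the tail
def altRuns : List String → List String
  | [] => []
  | x :: xs =>
    (if PySem.Str.strip x = "" then "" else PySem.Str.rstrip x)
      :: altRuns (xs.dropWhile (fun y => PySem.Str.strip y == PySem.Str.strip x))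
termination_by xs => xs.length
decreasing_by
  have := List.length_dropWhile_le (fun y => PySem.Str.strip y == PySem.Str.strip x) xs
  simp only [List.length_cons]
  omega

def dedupe_consecutive_lines_py_alt (s : String) : String :=
  let lines := PySem.Str.splitlines (if s = "" then "" else s)
  PySem.Str.strip (PySem.Str.join "\n" (altRuns lines))

-- ===== PRECONDITION & SPEC =====
def Spec_dedupe_consecutive_lines_py (s : String) (out : String) : Prop := out = dedupe_consecutive_lines_py_alt s
instance (s : String) (out : String) : Decidable (Spec_dedupe_consecutive_lines_py s out) := by unfold Spec_dedupe_consecutive_lines_py; infer_instance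

-- ===== CLAIM (what is proved, stated in full; the proofs are below) =====
def Claim_equal_dedupe_consecutive_lines_py : Prop := ∀ (s : String), Dom_dedupe_consecutive_lines_py s → Spec_dedupe_consecutive_lines_py s (dedupe_consecutive_lines_py s)

-- ===== LEMMAS AND PROOFS =====

theorem dropWhile_self_idem {α : Type} (p : α → Bool) (l : List α) :
    (l.dropWhile p).dropWhile p = l.dropWhile p := by
  induction l with
  | nil => simp
  | cons a l ih => by_cases h : p a <;> simp [h, ih]

theorem rstrip_idem (l : List Char) :
    PySem.Chars.rstrip (PySem.Chars.rstrip l) = PySem.Chars.rstrip l := by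
  simp [PySem.Chars.rstrip, dropWhile_self_idem]

theorem rstrip_eq_nil_iff (l : List Char) :
    PySem.Chars.rstrip l = [] ↔ ∀ x ∈ l, PySem.Chars.isspace x = true := by
  simp [PySem.Chars.rstrip, List.dropWhile_eq_nil_iff]

theorem rstrip_cons (c : Char) (l : List Char) :
    PySem.Chars.rstrip (c :: l) =
      if PySem.Chars.rstrip l = [] then (if PySem.Chars.isspace c then [] else [c])
      else c :: PySem.Chars.rstrip l := by
  simp only [PySem.Chars.rstrip, List.reverse_cons, List.dropWhile_append]
  by_cases h : List.dropWhile PySem.Chars.isspace l.reverse = [] <;>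
    by_cases hc : PySem.Chars.isspace c <;>
    simp [h, hc, List.isEmpty_iff]

theorem lstrip_rstrip_comm (l : List Char) :
    PySem.Chars.lstrip (PySem.Chars.rstrip l) = PySem.Chars.rstrip (PySem.Chars.lstrip l) := by
  induction l with
  | nil => rfl
  | cons c l ih =>
    rw [rstrip_cons]
    by_cases hc : PySem.Chars.isspace c
    · by_cases h : PySem.Chars.rstrip l = []
      · have hall : ∀ x ∈ l, PySem.Chars.isspace x = true := (rstrip_eq_nil_iff l).mp h
        have hl : List.dropWhile PySem.Chars.isspace l = [] :=
          List.dropWhile_eq_nil_iff.mpr hall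
        rw [if_pos h, if_pos hc]
        show PySem.Chars.lstrip [] = PySem.Chars.rstrip (PySem.Chars.lstrip (c :: l))
        simp [PySem.Chars.lstrip, hc, hl, PySem.Chars.rstrip]
      · rw [if_neg h]
        show PySem.Chars.lstrip (c :: PySem.Chars.rstrip l)
          = PySem.Chars.rstrip (PySem.Chars.lstrip (c :: l))
        simp only [PySem.Chars.lstrip, List.dropWhile_cons, hc, ite_true] at ih ⊢
        exact ih
    · by_cases h : PySem.Chars.rstrip l = [] <;>
        simp [h, hc, PySem.Chars.lstrip, rstrip_cons]

theorem strip_rstrip (l : List Char) :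
    PySem.Chars.strip (PySem.Chars.rstrip l) = PySem.Chars.strip l := by
  simp only [PySem.Chars.strip]
  rw [lstrip_rstrip_comm, rstrip_idem]

theorem strip_nil_rstrip (l : List Char) (h : PySem.Chars.strip l = []) :
    PySem.Chars.rstrip l = [] := by
  rw [rstrip_eq_nil_iff]
  simp only [PySem.Chars.strip, PySem.Chars.lstrip] at h
  have h' : ∀ x ∈ List.dropWhile PySem.Chars.isspace l, PySem.Chars.isspace x = true :=
    (rstrip_eq_nil_iff _).mp h
  intro x hx
  rw [← List.takeWhile_append_dropWhile (p := PySem.Chars.isspace) (l := l)] at hx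
  rcases List.mem_append.mp hx with h1 | h2
  · exact List.mem_takeWhile_imp h1
  · exact h' x h2

-- String-level bridges
theorem str_strip_rstrip (s : String) :
    PySem.Str.strip (PySem.Str.rstrip s) = PySem.Str.strip s := by
  simp [PySem.Str.strip, PySem.Str.rstrip, strip_rstrip]

theorem str_rstrip_idem (s : String) :
    PySem.Str.rstrip (PySem.Str.rstrip s) = PySem.Str.rstrip s := by
  simp [PySem.Str.rstrip, rstrip_idem]

theorem str_strip_empty_rstrip (s : String) (h : PySem.Str.strip s = "") :
    PySem.Str.rstrip s = "" := by
  have h' : PySem.Chars.strip s.toList = [] := by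
    have := congrArg String.toList h
    simpa [PySem.Str.strip] using this
  simp [PySem.Str.rstrip, strip_nil_rstrip _ h']

-- proof-side characterisation of the emitted line list, keyed by the stripped last output
def fB : Option String → List String → List String
  | _, [] => []
  | k, x :: xs =>
    if some (PySem.Str.strip x) = k then fB k xs
    else (if PySem.Str.strip x = "" then "" else PySem.Str.rstrip x)
          :: fB (some (PySem.Str.strip x)) xs

theorem fB_cons (k : Option String) (x : String) (xs : List String) :
    fB k (x :: xs) =
      if some (PySem.Str.strip x) = k then fB k xs
      else (if PySem.Str.strip x = "" then "" else PySem.Str.rstrip x)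
            :: fB (some (PySem.Str.strip x)) xs := rfl

theorem altRuns_cons (x : String) (xs : List String) :
    altRuns (x :: xs) =
      (if PySem.Str.strip x = "" then "" else PySem.Str.rstrip x)
        :: altRuns (xs.dropWhile (fun y => PySem.Str.strip y == PySem.Str.strip x)) := by
  rw [altRuns]

def GoodL (out : List String) : Prop :=
  ∀ l, out.getLast? = some l → PySem.Str.rstrip l = l

theorem goodL_append (out : List String) (x : String) (hx : PySem.Str.rstrip x = x) :
    GoodL (out ++ [x]) := by
  intro l hl
  rw [List.getLast?_concat] at hl
  cases hl; exact hx

theorem good_last_empty_iff (out : List String) (l : String) (hg : GoodL out)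
    (hl : out.getLast? = some l) : (l = "") ↔ (PySem.Str.strip l = "") := by
  constructor
  · rintro rfl; rfl
  · intro h
    have := hg l hl
    rw [← this]
    exact str_strip_empty_rstrip l h

theorem foldl_stepA_eq_fB (lines : List String) :
    ∀ out : List String, GoodL out →
      lines.foldl dedupeStepA out = out ++ fB (out.getLast?.map PySem.Str.strip) lines := by
  induction lines with
  | nil => intro out _; simp [fB]
  | cons ln rest ih =>
    intro out hg
    have hsr : PySem.Str.strip (PySem.Str.rstrip ln) = PySem.Str.strip ln := str_strip_rstrip ln
    simp only [List.foldl_cons]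
    by_cases hb : PySem.Str.strip ln = ""
    · -- blank line
      by_cases hlast : out.getLast? = some ""
      · have hstep : dedupeStepA out ln = out := by
          simp [dedupeStepA, hsr, hb, hlast]
        rw [hstep, ih out hg, fB_cons]
        rw [if_pos (by rw [hb, hlast]; rfl)]
      · have hstep : dedupeStepA out ln = out ++ [""] := by
          simp [dedupeStepA, hsr, hb, hlast]
        have hkey : some (PySem.Str.strip ln) ≠ out.getLast?.map PySem.Str.strip := by
          cases hL : out.getLast? with
          | none => simp
          | some l =>
            simp only [Option.map_some, ne_eq, Option.some.injEq, hb]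
            intro hsl
            exact hlast (by rw [hL, (good_last_empty_iff out l hg hL).mpr hsl.symm])
        rw [hstep, ih _ (goodL_append out "" rfl), fB_cons, if_neg hkey]
        rw [List.getLast?_concat]
        simp only [hb, List.append_assoc, List.singleton_append, Option.map_some]
        rfl
    · -- non-blank line
      by_cases hdup : out.getLast?.map PySem.Str.strip = some (PySem.Str.strip ln)
      · have hstep : dedupeStepA out ln = out := by
          simp [dedupeStepA, hsr, hb, hdup]
        rw [hstep, ih out hg, fB_cons, if_pos hdup.symm, hdup]
      · have hstep : dedupeStepA out ln = out ++ [PySem.Str.rstrip ln] := by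
          simp [dedupeStepA, hsr, hb, hdup]
        rw [hstep, ih _ (goodL_append out _ (str_rstrip_idem ln)), fB_cons,
          if_neg (fun h => hdup h.symm), List.getLast?_concat]
        simp [hsr, hb]

theorem fB_some_eq_altRuns (xs : List String) :
    ∀ k : String, fB (some k) xs =
      altRuns (xs.dropWhile (fun y => PySem.Str.strip y == k)) := by
  induction xs with
  | nil => intro k; simp [fB, altRuns]
  | cons x xs ih =>
    intro k
    rw [fB_cons]
    by_cases h : PySem.Str.strip x = k
    · have heq : some (PySem.Str.strip x) = some k := by rw [h]
      have hbe : (PySem.Str.strip x == k) = true := by simpa using h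
      rw [if_pos heq, List.dropWhile_cons, hbe, if_pos rfl, ih k]
    · have hne : ¬ (some (PySem.Str.strip x) = some k) := by simpa using h
      have hbe : (PySem.Str.strip x == k) = false := by simpa using h
      rw [if_neg hne, List.dropWhile_cons, hbe]
      simp only [Bool.false_eq_true, if_false]
      rw [altRuns_cons, ih (PySem.Str.strip x)]

theorem fB_none_eq_altRuns (xs : List String) : fB none xs = altRuns xs := by
  cases xs with
  | nil => simp [fB, altRuns]
  | cons x xs =>
    rw [fB_cons, if_neg (by simp), altRuns_cons, fB_some_eq_altRuns xs (PySem.Str.strip x)]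

-- ===== VERDICT (by name: the statement is the Claim_ definition above) =====
theorem dedupe_consecutive_lines_py_spec : Claim_equal_dedupe_consecutive_lines_py := by
  intro s _
  show dedupe_consecutive_lines_py s = dedupe_consecutive_lines_py_alt s
  simp only [dedupe_consecutive_lines_py, dedupe_consecutive_lines_py_alt]
  rw [foldl_stepA_eq_fB _ [] (by intro l hl; simp at hl), List.nil_append]
  simp only [List.getLast?_nil, Option.map_none]
  rw [fB_none_eq_altRuns]
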